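-- pv_equiv track=rewrite | github.com/michmoyn/EK128-hw4 | topfun.py | is_valley
-- ===== SOURCE A (Python) =====
-- def is_valley(seq):
--     from string import ascii_letters
--     seq_list = list(seq)
--     number_list = []
--     index = 0
--     c = 0
--     if (len(seq)==1 or len(seq)==2):
--         return False
--     for x in seq:
--         n=ord(x)
--         number_list.append(n)
--     for numbers in number_list[0:len(seq)//2]:
--         if (number_list[index] > number_list[index + 1]):
--             c = c
--             index+=1
--         else:
--             c+=1
--     for numbers in number_list[len(seq)//2:len(seq)-1]:
--         if (number_list[index]<number_list[index+1]):
--             c=c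
--             index+=1
--         else:
--             c+=1
--     if (c==0):
--         return True
--     else:
--         return False
-- ===== SOURCE B (Python) =====
-- def is_valley(seq):
--     ords = [ord(x) for x in seq]
--     n = len(ords)
--     if n == 1 or n == 2:
--         return False
--     mid = n // 2
--     first = ords[:mid + 1]
--     second = ords[mid:]
--     return (first == sorted(first, reverse=True) and len(set(first)) == len(first)
--             and second == sorted(second) and len(set(second)) == len(second))
-- ===== Notes on version B (the rewrite author's own statement) =====
-- stated objective: simpler
-- what changed: Replaced the two violation-counting index/counter loops with a split at n//2 plus a sort-then-compare + distinctness check (strictly monotone iff equal to its sort and duplicate-free).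
import Mathlib
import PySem

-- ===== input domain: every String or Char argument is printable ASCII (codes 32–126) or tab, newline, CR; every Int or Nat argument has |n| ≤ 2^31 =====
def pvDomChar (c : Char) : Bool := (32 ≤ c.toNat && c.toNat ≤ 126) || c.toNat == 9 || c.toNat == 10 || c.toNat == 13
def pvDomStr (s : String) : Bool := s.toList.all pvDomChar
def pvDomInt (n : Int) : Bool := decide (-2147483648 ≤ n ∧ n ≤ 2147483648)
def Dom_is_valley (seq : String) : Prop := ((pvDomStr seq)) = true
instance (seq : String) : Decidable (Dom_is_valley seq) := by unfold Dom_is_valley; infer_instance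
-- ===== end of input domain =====

-- B replaces A's two violation-counting index/counter loops by splitting at n//2 and checking
-- each half with sort-then-compare plus a set-based distinctness test (objective: simpler).

-- ===== PORT A =====
-- number_list[index] / number_list[index+1] are ported with pyGetD default 0; on every iteration
-- of either loop index+1 < len(number_list), so the default is never read (Python never raises here).
def is_valley (seq : String) : Bool :=
  let seqList := seq.toList
  let numberList : List Int := seqList.map (fun x => (x.toNat : Int))
  if seqList.length = 1 ∨ seqList.length = 2 then
    false
  else
    let n : Int := (seqList.length : Int)
    let st1 :=
      (PySem.List.slice numberList (some 0) (some (PySem.Int.floordiv n 2))).foldl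
        (fun (st : Int × Int) _ =>
          if PySem.List.pyGetD numberList st.1 0 > PySem.List.pyGetD numberList (st.1 + 1) 0 then
            (st.1 + 1, st.2)
          else
            (st.1, st.2 + 1)) (0, 0)
    let st2 :=
      (PySem.List.slice numberList (some (PySem.Int.floordiv n 2)) (some (n - 1))).foldl
        (fun (st : Int × Int) _ =>
          if PySem.List.pyGetD numberList st.1 0 < PySem.List.pyGetD numberList (st.1 + 1) 0 then
            (st.1 + 1, st.2)
          else
            (st.1, st.2 + 1)) st1
    decide (st2.2 = 0)

-- ===== PORT B =====
def is_valley_alt (seq : String) : Bool :=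
  let ords : List Int := seq.toList.map (fun x => (x.toNat : Int))
  let n : Int := (ords.length : Int)
  if n = 1 ∨ n = 2 then
    false
  else
    let mid : Int := PySem.Int.floordiv n 2
    let first := PySem.List.slice ords none (some (mid + 1))
    let second := PySem.List.slice ords (some mid) none
    decide (first = PySem.List.sorted first (fun x => x) true) &&
      decide ((PySem.Set.ofList first).length = first.length) &&
      decide (second = PySem.List.sorted second (fun x => x) false) &&
      decide ((PySem.Set.ofList second).length = second.length)

-- ===== PRECONDITION & SPEC =====
def Spec_is_valley (seq : String) (out : Bool) : Prop := out = is_valley_alt seq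
instance (seq : String) (out : Bool) : Decidable (Spec_is_valley seq out) := by unfold Spec_is_valley; infer_instance

-- ===== CLAIM (what is proved, stated in full; the proofs are below) =====
def Claim_equal_is_valley : Prop := ∀ (seq : String), Dom_is_valley seq → Spec_is_valley seq (is_valley seq)

-- ===== LEMMAS AND PROOFS =====

-- The step a single iteration of either of A's loops performs on (index, c).
def pvStep (P : Int → Prop) [DecidablePred P] (st : Int × Int) : Int × Int :=
  if P st.1 then (st.1 + 1, st.2) else (st.1, st.2 + 1)

lemma pvFoldl_eq_iterate {α : Type} (P : Int → Prop) [DecidablePred P] (l : List α) (st : Int × Int) :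
    l.foldl (fun (st : Int × Int) _ =>
      if P st.1 then (st.1 + 1, st.2) else (st.1, st.2 + 1)) st = (pvStep P)^[l.length] st := by
  induction l generalizing st with
  | nil => rfl
  | cons x xs ih => simp [List.foldl_cons, ih, Function.iterate_succ_apply, pvStep]

lemma pvStep_c_le (P : Int → Prop) [DecidablePred P] (k : Nat) (st : Int × Int) :
    st.2 ≤ ((pvStep P)^[k] st).2 := by
  induction k generalizing st with
  | zero => simp
  | succ k ih =>
    rw [Function.iterate_succ_apply]
    refine le_trans ?_ (ih (pvStep P st))
    unfold pvStep; split <;> simp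

lemma pvIter_good (P : Int → Prop) [DecidablePred P] (k : Nat) (i c : Int)
    (h : ∀ j : Nat, j < k → P (i + j)) : (pvStep P)^[k] (i, c) = (i + k, c) := by
  induction k generalizing i with
  | zero => simp
  | succ k ih =>
    rw [Function.iterate_succ_apply]
    have h0 : P i := by simpa using h 0 (by omega)
    have hstep : pvStep P (i, c) = (i + 1, c) := by simp [pvStep, h0]
    rw [hstep, ih (i + 1) (fun j hj => by
      have hP := h (j + 1) (by omega)
      have e : i + 1 + (j : Int) = i + ((j + 1 : Nat) : Int) := by push_cast; ring
      rw [e]; exact hP)]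
    push_cast; ring_nf

lemma pvIter_zero_iff (P : Int → Prop) [DecidablePred P] (k : Nat) (i : Int) :
    ((pvStep P)^[k] (i, 0)).2 = 0 ↔ ∀ j : Nat, j < k → P (i + j) := by
  constructor
  · intro h
    induction k generalizing i with
    | zero => intro j hj; omega
    | succ k ih =>
      by_cases h0 : P i
      · have hstep : pvStep P (i, 0) = (i + 1, 0) := by simp [pvStep, h0]
        rw [Function.iterate_succ_apply, hstep] at h
        have hrest := ih (i + 1) h
        intro j hj
        cases j with
        | zero => simpa using h0
        | succ j =>
          have hP := hrest j (by omega)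
          have e : i + ((j + 1 : Nat) : Int) = i + 1 + (j : Int) := by push_cast; ring
          rw [e]; exact hP
      · exfalso
        have hstep : pvStep P (i, 0) = (i, 1) := by simp [pvStep, h0]
        rw [Function.iterate_succ_apply, hstep] at h
        have := pvStep_c_le P k (i, 1)
        simp at this; omega
  · intro h
    rw [pvIter_good P k i 0 h]

lemma pvTwo_zero_iff (Pd Pu : Int → Prop) [DecidablePred Pd] [DecidablePred Pu] (K1 K2 : Nat) :
    ((pvStep Pu)^[K2] ((pvStep Pd)^[K1] ((0 : Int), (0 : Int)))).2 = 0 ↔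
      (∀ j : Nat, j < K1 → Pd j) ∧ (∀ j : Nat, j < K2 → Pu ((K1 : Int) + j)) := by
  by_cases hd : ∀ j : Nat, j < K1 → Pd j
  · have h1 : (pvStep Pd)^[K1] ((0 : Int), (0 : Int)) = ((K1 : Int), 0) := by
      have := pvIter_good Pd K1 0 0 (fun j hj => by simpa using hd j hj)
      simpa using this
    rw [h1, pvIter_zero_iff Pu K2 (K1 : Int)]
    exact ⟨fun h => ⟨hd, h⟩, fun h => h.2⟩
  · have h2 : ((pvStep Pd)^[K1] ((0 : Int), (0 : Int))).2 ≠ 0 := by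
      intro h
      exact hd (fun j hj => by simpa using (pvIter_zero_iff Pd K1 0).mp h j hj)
    have h0 : (0 : Int) ≤ ((pvStep Pd)^[K1] ((0 : Int), (0 : Int))).2 := by
      simpa using pvStep_c_le Pd K1 ((0 : Int), (0 : Int))
    have hmono := pvStep_c_le Pu K2 ((pvStep Pd)^[K1] ((0 : Int), (0 : Int)))
    constructor
    · intro h; exfalso; omega
    · rintro ⟨h, -⟩; exact absurd h hd

-- set(l) keeps a subsequence of l (first occurrences in order)
lemma pvOfList_sublist {α : Type} [BEq α] [LawfulBEq α] (l : List α) :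
    (PySem.Set.ofList l).Sublist l := by
  induction l with
  | nil => simp [PySem.Set.ofList_nil]
  | cons x xs ih =>
    rw [PySem.Set.ofList_cons]
    refine List.Sublist.cons₂ x (List.Sublist.trans ?_ ih)
    rw [show PySem.Set.discard (PySem.Set.ofList xs) x
          = (PySem.Set.ofList xs).filter (fun y => !(y == x)) from rfl]
    exact List.filter_sublist

lemma pvNodup_of_ofList_length {α : Type} [BEq α] [LawfulBEq α] (l : List α)
    (h : (PySem.Set.ofList l).length = l.length) : l.Nodup := by
  have := (pvOfList_sublist l).eq_of_length h
  rw [← this]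
  exact PySem.Set.nodup_ofList l

-- 'l == sorted(l, reverse=True) and len(set(l)) == len(l)' says exactly: strictly decreasing
lemma pvSortedRev_iff (l : List Int) :
    (l = PySem.List.sorted l (fun x => x) true ∧ (PySem.Set.ofList l).length = l.length) ↔
      l.Pairwise (· > ·) := by
  constructor
  · rintro ⟨hs, hlen⟩
    have hnd : l.Nodup := pvNodup_of_ofList_length l hlen
    have hle : l.Pairwise (fun a b : Int => b ≤ a) := by
      have := PySem.List.sorted_pairwise_rev l (fun x => x)
      rw [← hs] at this; exact this
    exact (hle.and hnd).imp (fun hx => lt_of_le_of_ne hx.1 (Ne.symm hx.2))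
  · intro h
    have hs : PySem.List.sorted l (fun x => x) true = l :=
      PySem.List.sorted_rev_eq_of_perm_of_pairwise_gt l l (fun x => x) (List.Perm.refl l) (h.imp fun hx => hx)
    have hnd : l.Nodup := h.imp fun hx => ne_of_gt hx
    exact ⟨hs.symm, by rw [PySem.Set.ofList_eq_self_of_nodup l hnd]⟩

-- 'l == sorted(l) and len(set(l)) == len(l)' says exactly: strictly increasing
lemma pvSorted_iff (l : List Int) :
    (l = PySem.List.sorted l (fun x => x) false ∧ (PySem.Set.ofList l).length = l.length) ↔
      l.Pairwise (· < ·) := by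
  constructor
  · rintro ⟨hs, hlen⟩
    have hnd : l.Nodup := pvNodup_of_ofList_length l hlen
    have hle : l.Pairwise (fun a b : Int => a ≤ b) := by
      have := PySem.List.sorted_pairwise l (fun x => x)
      rw [← hs] at this; exact this
    exact (hle.and hnd).imp (fun hx => lt_of_le_of_ne hx.1 hx.2)
  · intro h
    have hs : PySem.List.sorted l (fun x => x) false = l :=
      PySem.List.sorted_eq_of_perm_of_pairwise_lt l l (fun x => x) (List.Perm.refl l) (h.imp fun hx => hx)
    have hnd : l.Nodup := h.imp fun hx => ne_of_lt hx
    exact ⟨hs.symm, by rw [PySem.Set.ofList_eq_self_of_nodup l hnd]⟩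

lemma pvPairwise_gt_iff (l : List Int) :
    l.Pairwise (· > ·) ↔ ∀ (i : Nat) (h : i + 1 < l.length), l[i] > l[i + 1] := by
  rw [← List.isChain_iff_pairwise, List.isChain_iff_getElem]

lemma pvPairwise_lt_iff (l : List Int) :
    l.Pairwise (· < ·) ↔ ∀ (i : Nat) (h : i + 1 < l.length), l[i] < l[i + 1] := by
  rw [← List.isChain_iff_pairwise, List.isChain_iff_getElem]


lemma pvDown_iff (nl : List Int) (M : Nat) (hM : M + 1 ≤ nl.length) :
    (∀ j : Nat, j < M → PySem.List.pyGetD nl ((j : Nat) : Int) 0 > PySem.List.pyGetD nl (((j : Nat) : Int) + 1) 0) ↔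
      (nl.take (M + 1)).Pairwise (· > ·) := by
  rw [pvPairwise_gt_iff]
  have hlt : (nl.take (M + 1)).length = M + 1 := by simp; omega
  constructor
  · intro h i hi
    have hi' : i < M := by omega
    have hp := h i hi'
    rw [show ((i : Nat) : Int) + 1 = (((i + 1 : Nat)) : Int) by push_cast; ring] at hp
    rw [PySem.List.pyGetD_natCast, PySem.List.pyGetD_natCast,
      List.getD_eq_getElem nl 0 (by omega), List.getD_eq_getElem nl 0 (by omega)] at hp
    rw [List.getElem_take, List.getElem_take]
    exact hp
  · intro h j hj
    have hj1 : j + 1 < (nl.take (M + 1)).length := by omega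
    have hp := h j hj1
    rw [List.getElem_take, List.getElem_take] at hp
    rw [show ((j : Nat) : Int) + 1 = (((j + 1 : Nat)) : Int) by push_cast; ring,
      PySem.List.pyGetD_natCast, PySem.List.pyGetD_natCast,
      List.getD_eq_getElem nl 0 (by omega), List.getD_eq_getElem nl 0 (by omega)]
    exact hp

lemma pvUp_iff (nl : List Int) (M : Nat) (hM : M ≤ nl.length) :
    (∀ j : Nat, j < nl.length - 1 - M →
        PySem.List.pyGetD nl ((M : Int) + (j : Int)) 0 < PySem.List.pyGetD nl ((M : Int) + (j : Int) + 1) 0) ↔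
      (nl.drop M).Pairwise (· < ·) := by
  rw [pvPairwise_lt_iff]
  have hld : (nl.drop M).length = nl.length - M := by simp
  constructor
  · intro h i hi
    have hp := h i (by omega)
    rw [show (M : Int) + (i : Int) = (((M + i : Nat)) : Int) by push_cast; ring,
      show (((M + i : Nat)) : Int) + 1 = (((M + i + 1 : Nat)) : Int) by push_cast; ring,
      PySem.List.pyGetD_natCast, PySem.List.pyGetD_natCast,
      List.getD_eq_getElem nl 0 (by omega), List.getD_eq_getElem nl 0 (by omega)] at hp
    rw [List.getElem_drop, List.getElem_drop]
    convert hp using 2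
  · intro h j hj
    have hj1 : j + 1 < (nl.drop M).length := by omega
    have hp := h j hj1
    rw [List.getElem_drop, List.getElem_drop] at hp
    rw [show (M : Int) + (j : Int) = (((M + j : Nat)) : Int) by push_cast; ring,
      show (((M + j : Nat)) : Int) + 1 = (((M + j + 1 : Nat)) : Int) by push_cast; ring,
      PySem.List.pyGetD_natCast, PySem.List.pyGetD_natCast,
      List.getD_eq_getElem nl 0 (by omega), List.getD_eq_getElem nl 0 (by omega)]
    convert hp using 2

lemma pvA_true_iff (seq : String) (hN : 3 ≤ seq.toList.length) :
    is_valley seq = true ↔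
      (((seq.toList.map (fun x => (x.toNat : Int))).take (seq.toList.length / 2 + 1)).Pairwise (· > ·) ∧
        ((seq.toList.map (fun x => (x.toNat : Int))).drop (seq.toList.length / 2)).Pairwise (· < ·)) := by
  have hguard : ¬ (seq.toList.length = 1 ∨ seq.toList.length = 2) := by omega
  simp only [is_valley]
  rw [if_neg hguard]
  set nl := seq.toList.map (fun x => (x.toNat : Int)) with hnl
  set N := seq.toList.length with hNd
  set M := N / 2 with hM
  have hlen : nl.length = N := by rw [hnl, List.length_map]
  have hMN : M + 1 ≤ N := by omega
  have hfd : PySem.Int.floordiv (N : Int) 2 = (M : Int) := by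
    exact_mod_cast PySem.Int.floordiv_natCast N 2
  have hsl1 : PySem.List.slice nl (some 0) (some ((M : Nat) : Int)) = nl.take M := by
    rw [PySem.List.slice_zero_start, PySem.List.slice_to_natCast]
  have hN1 : ((N : Int) - 1) = (((N - 1 : Nat)) : Int) := by push_cast [Nat.cast_sub (by omega : 1 ≤ N)]; ring
  have hsl2 : PySem.List.slice nl (some ((M : Nat) : Int)) (some ((N : Int) - 1)) =
      (nl.drop M).take (N - 1 - M) := by
    rw [hN1, PySem.List.slice_natCast]
  rw [hfd, hsl1, hsl2]
  rw [pvFoldl_eq_iterate (fun i => PySem.List.pyGetD nl i 0 > PySem.List.pyGetD nl (i + 1) 0),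
    pvFoldl_eq_iterate (fun i => PySem.List.pyGetD nl i 0 < PySem.List.pyGetD nl (i + 1) 0)]
  have hl1 : (nl.take M).length = M := by simp; omega
  have hl2 : ((nl.drop M).take (N - 1 - M)).length = N - 1 - M := by simp; omega
  rw [hl1, hl2, decide_eq_true_eq,
    pvTwo_zero_iff (fun i => PySem.List.pyGetD nl i 0 > PySem.List.pyGetD nl (i + 1) 0)
      (fun i => PySem.List.pyGetD nl i 0 < PySem.List.pyGetD nl (i + 1) 0) M (N - 1 - M)]
  rw [show N - 1 - M = nl.length - 1 - M by omega] at *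
  exact and_congr (pvDown_iff nl M (by omega)) (pvUp_iff nl M (by omega))

lemma pvB_true_iff (seq : String) (hN : 3 ≤ seq.toList.length) :
    is_valley_alt seq = true ↔
      (((seq.toList.map (fun x => (x.toNat : Int))).take (seq.toList.length / 2 + 1)).Pairwise (· > ·) ∧
        ((seq.toList.map (fun x => (x.toNat : Int))).drop (seq.toList.length / 2)).Pairwise (· < ·)) := by
  simp only [is_valley_alt]
  set nl := seq.toList.map (fun x => (x.toNat : Int)) with hnl
  set N := seq.toList.length with hNd
  set M := N / 2 with hM
  have hlen : nl.length = N := by rw [hnl, List.length_map]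
  rw [hlen]
  have hguard : ¬ ((N : Int) = 1 ∨ (N : Int) = 2) := by omega
  rw [if_neg hguard]
  have hfd : PySem.Int.floordiv (N : Int) 2 = (M : Int) := by
    exact_mod_cast PySem.Int.floordiv_natCast N 2
  have hsl1 : PySem.List.slice nl none (some ((M : Int) + 1)) = nl.take (M + 1) := by
    rw [show (M : Int) + 1 = (((M + 1 : Nat)) : Int) by push_cast; ring, PySem.List.slice_to_natCast]
  have hsl2 : PySem.List.slice nl (some (M : Int)) none = nl.drop M := by
    rw [PySem.List.slice_from_natCast]
  rw [hfd, hsl1, hsl2]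
  simp only [Bool.and_eq_true, decide_eq_true_eq]
  constructor
  · rintro ⟨⟨⟨h1, h2⟩, h3⟩, h4⟩
    exact ⟨(pvSortedRev_iff _).mp ⟨h1, h2⟩, (pvSorted_iff _).mp ⟨h3, h4⟩⟩
  · rintro ⟨hp, hq⟩
    obtain ⟨h1, h2⟩ := (pvSortedRev_iff _).mpr hp
    obtain ⟨h3, h4⟩ := (pvSorted_iff _).mpr hq
    exact ⟨⟨⟨h1, h2⟩, h3⟩, h4⟩

-- ===== VERDICT (by name: the statement is the Claim_ definition above) =====
theorem is_valley_spec : Claim_equal_is_valley := by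
  intro seq _
  unfold Spec_is_valley
  by_cases h12 : seq.toList.length = 1 ∨ seq.toList.length = 2
  · have hA : is_valley seq = false := by
      simp only [is_valley]; rw [if_pos h12]
    have hB : is_valley_alt seq = false := by
      simp only [is_valley_alt]
      rw [List.length_map, if_pos (by rcases h12 with h | h <;> [left; right] <;> exact_mod_cast h)]
    rw [hA, hB]
  · by_cases h0 : seq.toList.length = 0
    · have hseq : seq = "" := String.toList_eq_nil_iff.mp (List.length_eq_zero_iff.mp h0)
      subst hseq; rfl
    · rw [Bool.eq_iff_iff, pvA_true_iff seq (by omega), pvB_true_iff seq (by omega)]
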